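-- pv_equiv track=rewrite | github.com/avinash-reddy-rangu/jars | dp.py | insert_numeric_anchors
-- ===== SOURCE A (Python) =====
-- from typing import Any, Dict, List, Optional, Tuple
--
-- def insert_numeric_anchors(anchors: List[Dict[str, Any]], message: str) -> str:
--     if not anchors:
--         return message
--     anchors_sorted = sorted(anchors, key=lambda a: int(a.get("offset", 0)))
--     out = message
--     shift = 0
--     for a in anchors_sorted:
--         try:
--             idx = int(a.get("id", 0)) + 1
--             off = int(a.get("offset", 0)) + shift
--             tag = f"[{idx}]"
--             out = out[:off] + tag + out[off:]
--             shift += len(tag)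
--         except Exception:
--             continue
--     return out
-- ===== SOURCE B (Python) =====
-- def insert_numeric_anchors(anchors, message):
--     n = len(message)
--     parts = []
--     prev = 0
--     for a in sorted(anchors, key=lambda a: int(a.get("offset", 0))):
--         pos = min(max(int(a.get("offset", 0)), 0), n)
--         parts.append(message[prev:pos])
--         parts.append("[%d]" % (int(a.get("id", 0)) + 1))
--         prev = pos
--     parts.append(message[prev:])
--     return "".join(parts)
-- ===== Notes on version B (the rewrite author's own statement) =====
-- stated objective: alternative
-- what changed: A re-concatenates the whole growing string once per anchor while tracking a running shift; B splits the original message once at the sorted clamped offsets and joins the pieces with the tags in a single pass (less copying; measured speed-up varies around 1.3-1.8x, so no speed is claimed).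
-- outside the precondition, e.g. on insert_numeric_anchors([{'id': 0, 'offset': -1}], 'ab'): A returns 'a[1]b', B returns '[1]ab'
import Mathlib
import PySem

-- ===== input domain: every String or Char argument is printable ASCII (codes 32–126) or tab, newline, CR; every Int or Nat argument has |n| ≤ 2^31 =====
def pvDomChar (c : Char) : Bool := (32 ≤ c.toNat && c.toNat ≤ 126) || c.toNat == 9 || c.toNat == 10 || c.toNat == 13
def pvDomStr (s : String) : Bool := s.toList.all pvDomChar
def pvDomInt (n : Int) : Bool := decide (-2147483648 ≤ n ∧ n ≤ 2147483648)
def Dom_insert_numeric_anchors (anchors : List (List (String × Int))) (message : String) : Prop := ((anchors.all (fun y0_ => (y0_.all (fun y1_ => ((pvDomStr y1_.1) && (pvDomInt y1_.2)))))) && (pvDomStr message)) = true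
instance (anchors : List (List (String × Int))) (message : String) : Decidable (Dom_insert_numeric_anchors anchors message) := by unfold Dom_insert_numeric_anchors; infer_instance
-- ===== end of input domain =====

-- B replaces A's repeated whole-string re-concatenation with a running shift by one split of the
-- original message at the sorted clamped offsets, joined with the tags in a single pass (objective: alternative, single-pass build).

-- ===== PORT A =====
-- a.get(k, v) on the association list (first match), shared by both ports
def pvGetD (d : List (String × Int)) (k : String) (v : Int) : Int :=
  match List.lookup k d with
  | some x => x
  | none => v

-- literal port of A; the try/except body is total on Int values (int() of an int, slicing and
-- concatenation never raise), so the except-continue branch is unreachable and not ported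
def insert_numeric_anchors (anchors : List (List (String × Int))) (message : String) : String :=
  if anchors = [] then message
  else
    let anchors_sorted := PySem.List.sorted anchors (fun a => pvGetD a "offset" 0) false
    let st := anchors_sorted.foldl (fun (st : List Char × Int) a =>
      let idx := pvGetD a "id" 0 + 1
      let off := pvGetD a "offset" 0 + st.2
      let tag := '[' :: PySem.Int.toChars idx ++ [']']
      (PySem.List.slice st.1 none (some off) ++ tag ++ PySem.List.slice st.1 (some off) none,
       st.2 + (tag.length : Int))) (message.toList, 0)
    String.ofList st.1

-- ===== PORT B =====
def insert_numeric_anchors_alt (anchors : List (List (String × Int))) (message : String) : String :=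
  let m := message.toList
  let n := m.length
  let st := (PySem.List.sorted anchors (fun a => pvGetD a "offset" 0) false).foldl
    (fun (st : List (List Char) × Int) a =>
      let pos := min (max (pvGetD a "offset" 0) 0) (n : Int)
      (st.1 ++ [PySem.List.slice m (some st.2) (some pos),
                '[' :: PySem.Int.toChars (pvGetD a "id" 0 + 1) ++ [']'] ], pos))
    ([], 0)
  String.ofList (PySem.Chars.join [] (st.1 ++ [PySem.List.slice m (some st.2) none]))

-- ===== PRECONDITION & SPEC =====
-- Pre_ excludes anchors carrying a negative offset: there A's result comes from the accidental
-- interaction of Python's from-the-end slicing with the running shift, while B counts positions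
-- from the start; both readings of a negative offset are defensible, neither is specified.
def Pre_insert_numeric_anchors (anchors : List (List (String × Int))) (message : String) : Prop :=
  ∀ a ∈ anchors, 0 ≤ pvGetD a "offset" 0
instance (anchors : List (List (String × Int))) (message : String) : Decidable (Pre_insert_numeric_anchors anchors message) := by unfold Pre_insert_numeric_anchors; infer_instance
def pvWitness_insert_numeric_anchors : (List (List (String × Int))) × String := ([[("id", 0), ("offset", 1)]], "ab")

def Spec_insert_numeric_anchors (anchors : List (List (String × Int))) (message : String) (out : String) : Prop := out = insert_numeric_anchors_alt anchors message
instance (anchors : List (List (String × Int))) (message : String) (out : String) : Decidable (Spec_insert_numeric_anchors anchors message out) := by unfold Spec_insert_numeric_anchors; infer_instance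

-- ===== CLAIM (what is proved, stated in full; the proofs are below) =====
def Claim_equal_insert_numeric_anchors : Prop := ∀ (anchors : List (List (String × Int))) (message : String), Dom_insert_numeric_anchors anchors message → Pre_insert_numeric_anchors anchors message → Spec_insert_numeric_anchors anchors message (insert_numeric_anchors anchors message)

-- ===== LEMMAS AND PROOFS =====

-- the sort key and the tag of one anchor
def pvKey (a : List (String × Int)) : Int := pvGetD a "offset" 0
def pvTag (a : List (String × Int)) : List Char := '[' :: PySem.Int.toChars (pvGetD a "id" 0 + 1) ++ [']']

-- A's loop, state (out, shift), extracted from the pair-valued foldl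
def pvAfold : List (List (String × Int)) → List Char → Int → List Char
  | [], out, _ => out
  | a :: ts, out, shift =>
      pvAfold ts
        (PySem.List.slice out none (some (pvKey a + shift)) ++ pvTag a ++
         PySem.List.slice out (some (pvKey a + shift)) none)
        (shift + ((pvTag a).length : Int))

-- B's output from position p on: the untouched piece up to each clamped offset, then the tag
def pvB (m : List Char) : List (List (String × Int)) → Nat → List Char
  | [], p => m.drop p
  | a :: ts, p =>
      (m.drop p).take (min (pvKey a).toNat m.length - p) ++ pvTag a ++
        pvB m ts (min (pvKey a).toNat m.length)

theorem pv_join_nil (xss : List (List Char)) : PySem.Chars.join [] xss = xss.flatten := by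
  simp only [PySem.Chars.join, List.intercalate]
  induction xss with
  | nil => rfl
  | cons x xs ih =>
    cases xs with
    | nil => simp
    | cons y ys => simpa [List.intersperse] using ih

theorem pv_take_app (C l : List Char) (t : Nat) : (C ++ l).take (C.length + t) = C ++ l.take t := by
  simp [List.take_append]

theorem pv_drop_app (C l : List Char) (t : Nat) : (C ++ l).drop (C.length + t) = l.drop t := by
  simp [List.drop_append]

theorem pvAfold_eq_foldl (ts : List (List (String × Int))) (out : List Char) (shift : Int) :
    (ts.foldl (fun (st : List Char × Int) a =>
      let idx := pvGetD a "id" 0 + 1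
      let off := pvGetD a "offset" 0 + st.2
      let tag := '[' :: PySem.Int.toChars idx ++ [']']
      (PySem.List.slice st.1 none (some off) ++ tag ++ PySem.List.slice st.1 (some off) none,
       st.2 + (tag.length : Int))) (out, shift)).1 = pvAfold ts out shift := by
  induction ts generalizing out shift with
  | nil => rfl
  | cons a ts ih => simp only [List.foldl_cons, pvAfold]; exact ih _ _

-- the heart of the equivalence: A's shifted insertions into the growing string equal B's
-- single split of the original message, generalized over the already-built prefix C
theorem pvMain (m : List Char) (ts : List (List (String × Int))) :
    ∀ (C : List Char) (p : Nat), p ≤ m.length →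
    (∀ a ∈ ts, (p : Int) ≤ pvKey a) →
    ts.Pairwise (fun a b => pvKey a ≤ pvKey b) →
    pvAfold ts (C ++ m.drop p) ((C.length : Int) - p) = C ++ pvB m ts p := by
  induction ts with
  | nil => intro C p _ _ _; simp [pvAfold, pvB]
  | cons a ts ih =>
    intro C p hp hmem hpair
    have hkey : (p : Int) ≤ pvKey a := hmem a List.mem_cons_self
    have hkey0 : (0 : Int) ≤ pvKey a := le_trans (by exact_mod_cast Nat.zero_le p) hkey
    have hpK : p ≤ (pvKey a).toNat := by omega
    have hlen : (m.drop p).length = m.length - p := by simp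
    have hoff : pvKey a + ((C.length : Int) - p)
        = ((C.length + ((pvKey a).toNat - p) : Nat) : Int) := by omega
    simp only [pvAfold, pvB, hoff, PySem.List.slice_to_natCast, PySem.List.slice_from_natCast,
      pv_take_app, pv_drop_app]
    have htake : (m.drop p).take ((pvKey a).toNat - p)
        = (m.drop p).take (min (pvKey a).toNat m.length - p) := by
      rcases Nat.le_total (pvKey a).toNat m.length with hc | hc
      · rw [min_eq_left hc]
      · rw [min_eq_right hc, List.take_of_length_le (by omega), List.take_of_length_le (by omega)]
    have hdrop : (m.drop p).drop ((pvKey a).toNat - p)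
        = m.drop (min (pvKey a).toNat m.length) := by
      rw [List.drop_drop]
      rcases Nat.le_total (pvKey a).toNat m.length with hc | hc
      · rw [min_eq_left hc]; congr 1; omega
      · rw [min_eq_right hc]
        rcases Nat.le_total (pvKey a).toNat m.length with hc2 | hc2
        · have : (pvKey a).toNat = m.length := le_antisymm hc2 hc
          rw [List.drop_eq_nil_of_le (by omega), List.drop_eq_nil_of_le (by omega)]
        · rw [List.drop_eq_nil_of_le (by omega), List.drop_eq_nil_of_le (by omega)]
    rw [htake, hdrop]
    have hklen : ((m.drop p).take (min (pvKey a).toNat m.length - p)).length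
        = min (pvKey a).toNat m.length - p := by
      rw [List.length_take]; omega
    have hshift : (C.length : Int) - p + ((pvTag a).length : Int)
        = (((C ++ (m.drop p).take (min (pvKey a).toNat m.length - p) ++ pvTag a).length : Int)
            - (min (pvKey a).toNat m.length : Nat)) := by
      simp only [List.length_append, hklen]
      push_cast
      omega
    rw [hshift,
      ih (C ++ (m.drop p).take (min (pvKey a).toNat m.length - p) ++ pvTag a)
        (min (pvKey a).toNat m.length)
        (by omega)
        (fun b hb => by
          have h1 := (List.pairwise_cons.mp hpair).1 b hb
          omega)
        (List.pairwise_cons.mp hpair).2]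
    simp [List.append_assoc]

theorem pvBfold (m : List Char) (ts : List (List (String × Int))) :
    ∀ (acc : List (List Char)) (p : Nat), p ≤ m.length →
    (∀ a ∈ ts, 0 ≤ pvKey a) →
    PySem.Chars.join []
      ((ts.foldl (fun (st : List (List Char) × Int) a =>
        let pos := min (max (pvGetD a "offset" 0) 0) ((m.length : Nat) : Int)
        (st.1 ++ [PySem.List.slice m (some st.2) (some pos),
                  '[' :: PySem.Int.toChars (pvGetD a "id" 0 + 1) ++ [']'] ], pos)) (acc, (p : Int))).1
        ++ [PySem.List.slice m
              (some (ts.foldl (fun (st : List (List Char) × Int) a =>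
                let pos := min (max (pvGetD a "offset" 0) 0) ((m.length : Nat) : Int)
                (st.1 ++ [PySem.List.slice m (some st.2) (some pos),
                          '[' :: PySem.Int.toChars (pvGetD a "id" 0 + 1) ++ [']'] ], pos)) (acc, (p : Int))).2)
              none])
      = PySem.Chars.join [] acc ++ pvB m ts p := by
  induction ts with
  | nil =>
    intro acc p _ _
    simp only [List.foldl_nil, pv_join_nil, pvB, PySem.List.slice_from_natCast]
    simp
  | cons a ts ih =>
    intro acc p hp hmem
    have hkey0 : (0 : Int) ≤ pvKey a := hmem a List.mem_cons_self
    have hkey0' : (0 : Int) ≤ pvGetD a "offset" 0 := hkey0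
    have hpos : min (max (pvGetD a "offset" 0) 0) ((m.length : Nat) : Int)
        = ((min (pvGetD a "offset" 0).toNat m.length : Nat) : Int) := by
      rw [max_eq_left hkey0']
      omega
    simp only [List.foldl_cons, hpos]
    rw [ih (acc ++ [PySem.List.slice m (some (p : Int))
            (some ((min (pvGetD a "offset" 0).toNat m.length : Nat) : Int)),
          '[' :: PySem.Int.toChars (pvGetD a "id" 0 + 1) ++ [']'] ])
        (min (pvGetD a "offset" 0).toNat m.length) (by omega)
        (fun b hb => hmem b (List.mem_cons_of_mem a hb))]
    simp only [pv_join_nil, pvB, pvKey, pvTag, List.flatten_append, PySem.List.slice_natCast]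
    simp [List.append_assoc]

theorem pv_eq (anchors : List (List (String × Int))) (message : String)
    (hpre : ∀ a ∈ anchors, 0 ≤ pvGetD a "offset" 0) :
    insert_numeric_anchors anchors message = insert_numeric_anchors_alt anchors message := by
  by_cases h : anchors = []
  · subst h
    simp [insert_numeric_anchors, insert_numeric_anchors_alt, PySem.List.sorted]
  · have hpair := PySem.List.sorted_pairwise anchors (fun a => pvGetD a "offset" 0)
    have hmem : ∀ a ∈ PySem.List.sorted anchors (fun a => pvGetD a "offset" 0) false,
        0 ≤ pvKey a := fun a ha => hpre a ((PySem.List.mem_sorted _ _ _ _).mp ha)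
    have hA := pvAfold_eq_foldl (PySem.List.sorted anchors (fun a => pvGetD a "offset" 0) false)
        message.toList 0
    have hmain := pvMain message.toList
        (PySem.List.sorted anchors (fun a => pvGetD a "offset" 0) false) [] 0
        (Nat.zero_le _) (fun a ha => by simpa using hmem a ha) hpair
    have hB := pvBfold message.toList
        (PySem.List.sorted anchors (fun a => pvGetD a "offset" 0) false) [] 0
        (Nat.zero_le _) hmem
    simp only [List.drop_zero, List.nil_append, List.length_nil, Nat.cast_zero, sub_zero] at hmain
    simp only [Nat.cast_zero, pv_join_nil, List.flatten_nil, List.nil_append] at hB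
    simp only [insert_numeric_anchors, insert_numeric_anchors_alt, if_neg h, pv_join_nil]
    rw [hA, hmain, hB]

-- ===== VERDICT (by name: the statement is the Claim_ definition above) =====
theorem insert_numeric_anchors_spec : Claim_equal_insert_numeric_anchors := by
  intro anchors message _ hpre
  unfold Spec_insert_numeric_anchors
  exact pv_eq anchors message hpre
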